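-- pv_equiv track=rewrite | github.com/shailja-thakur/AutoChip | results_testbench_scripts/generate_testbench_hdlbits.py | value_only_wave
-- ===== SOURCE A (Python) =====
-- def value_only_wave(wave, data=None):
--     """
--     Interpret the wave pattern to display only the values.
--     """
--     values = []
--     previous_value = None
--
--     # Mapping of characters to their values
--     mapping = {
--         'l': 'Low',
--         'h': 'High',
--         '0': '0',
--         '1': '1',
--         '=': 'Transition',
--         'x': 'x',
--         '.': 'Continuation'
--     }
--
--     data_idx = 0  # to keep track of data list index
--
--     for char in wave:
--         if char == '.':
--             values.append(previous_value)
--         elif char == '=':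
--             values.append(data[data_idx])
--             previous_value = data[data_idx]
--             data_idx += 1
--         else:
--             values.append(mapping[char])
--             previous_value = mapping[char]
--
--     return values
-- ===== SOURCE B (Python) =====
-- _CONT = object()  # sentinel: "continue previous value"
--
-- _MAPPING = {
--     'l': 'Low',
--     'h': 'High',
--     '0': '0',
--     '1': '1',
--     '=': 'Transition',
--     'x': 'x',
--     '.': 'Continuation',
-- }
--
--
-- def value_only_wave(wave, data=None):
--     """Two-pass: build a raw list with sentinels for '.', then forward-fill."""
--     raw = []
--     data_idx = 0
--     for char in wave:
--         if char == '.':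
--             raw.append(_CONT)
--         elif char == '=':
--             raw.append(data[data_idx])
--             data_idx += 1
--         else:
--             raw.append(_MAPPING[char])
--     values = []
--     prev = None
--     for v in raw:
--         if v is _CONT:
--             values.append(prev)
--         else:
--             values.append(v)
--             prev = v
--     return values
-- ===== Notes on version B (the rewrite author's own statement) =====
-- stated objective: alternative
-- what changed: A carries previous_value inline in one loop; B is a two-pass build-then-forward-fill: first pass maps each char to its value or a sentinel for '.', second pass replaces sentinels with the last real value.
-- outside the precondition, e.g. on value_only_wave('.1', ['a']): A returns [None, '1'], B returns [None, '1']; on value_only_wave('.', None): A returns [None], B returns [None]; on value_only_wave('=', None): A raises TypeError, B raises TypeError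
import Mathlib
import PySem

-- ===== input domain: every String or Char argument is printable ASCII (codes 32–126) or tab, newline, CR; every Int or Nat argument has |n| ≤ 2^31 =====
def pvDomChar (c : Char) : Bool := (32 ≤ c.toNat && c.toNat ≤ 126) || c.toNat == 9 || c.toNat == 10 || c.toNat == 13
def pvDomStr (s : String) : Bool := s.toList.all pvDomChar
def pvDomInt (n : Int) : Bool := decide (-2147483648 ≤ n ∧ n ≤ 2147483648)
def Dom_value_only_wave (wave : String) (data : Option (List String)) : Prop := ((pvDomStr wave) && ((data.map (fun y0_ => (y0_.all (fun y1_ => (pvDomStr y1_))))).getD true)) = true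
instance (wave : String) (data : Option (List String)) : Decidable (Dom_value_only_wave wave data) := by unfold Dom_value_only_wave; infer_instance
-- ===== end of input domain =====

-- B rewrites A's single state-carrying loop as a two-pass build-then-forward-fill (same cost, different decomposition).

-- ===== PORT A =====
def pvMapping : PySem.Dict Char String := PySem.Dict.ofList
  [('l', "Low"), ('h', "High"), ('0', "0"), ('1', "1"), ('=', "Transition"), ('x', "x"), ('.', "Continuation")]

-- A's loop: state = (values, previous_value, data_idx). previous_value = none models Python's None
-- (Pre_ excludes inputs where None is appended); Dict/list lookups use .getD "" where Python would raise (excluded by Pre_).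
def valueOnlyWaveStep (data : Option (List String)) (st : List String × Option String × Int) (c : Char) :
    List String × Option String × Int :=
  let (values, prev, idx) := st
  if c = '.' then (values ++ [prev.getD ""], prev, idx)
  else if c = '=' then
    let v := (PySem.List.pyGet? (data.getD []) idx).getD ""
    (values ++ [v], some v, idx + 1)
  else
    let v := (PySem.Dict.get? pvMapping c).getD ""
    (values ++ [v], some v, idx)

def value_only_wave (wave : String) (data : Option (List String)) : List String :=
  (wave.toList.foldl (valueOnlyWaveStep data) ([], none, 0)).1

-- ===== PORT B =====
-- first pass: none plays the role of Source B's _CONT sentinel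
def altRawStep (data : Option (List String)) (st : List (Option String) × Int) (c : Char) :
    List (Option String) × Int :=
  if c = '.' then (st.1 ++ [none], st.2)
  else if c = '=' then (st.1 ++ [some ((PySem.List.pyGet? (data.getD []) st.2).getD "")], st.2 + 1)
  else (st.1 ++ [some ((PySem.Dict.get? pvMapping c).getD "")], st.2)

-- second pass: forward-fill sentinels with the last real value
def altFillStep (st : List String × Option String) (v : Option String) : List String × Option String :=
  match v with
  | none => (st.1 ++ [st.2.getD ""], st.2)
  | some s => (st.1 ++ [s], some s)

def value_only_wave_alt (wave : String) (data : Option (List String)) : List String :=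
  let raw := (wave.toList.foldl (altRawStep data) ([], 0)).1
  (raw.foldl altFillStep ([], none)).1

-- ===== PRECONDITION & SPEC =====
-- Pre_ excludes exactly: chars outside the mapping (KeyError), more '=' than data provides
-- (IndexError, or TypeError when data is None), and a leading '.' — there A returns a list
-- containing Python None, which is not a value of the declared List String type.
def Pre_value_only_wave (wave : String) (data : Option (List String)) : Prop :=
  wave.toList.all (fun c => (['l', 'h', '0', '1', '=', 'x', '.'] : List Char).contains c) = true ∧
  wave.toList.head? ≠ some '.' ∧
  wave.toList.count '=' ≤ (data.getD []).length
instance (wave : String) (data : Option (List String)) : Decidable (Pre_value_only_wave wave data) := by unfold Pre_value_only_wave; infer_instance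

def pvWitness_value_only_wave : String × Option (List String) := ("1.=x.", some ["Top"])

def Spec_value_only_wave (wave : String) (data : Option (List String)) (out : List String) : Prop := out = value_only_wave_alt wave data
instance (wave : String) (data : Option (List String)) (out : List String) : Decidable (Spec_value_only_wave wave data out) := by unfold Spec_value_only_wave; infer_instance

-- ===== CLAIM (what is proved, stated in full; the proofs are below) =====
def Claim_equal_value_only_wave : Prop := ∀ (wave : String) (data : Option (List String)), Dom_value_only_wave wave data → Pre_value_only_wave wave data → Spec_value_only_wave wave data (value_only_wave wave data)

-- ===== LEMMAS AND PROOFS =====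

-- the raw-building fold only appends to its list accumulator
theorem altRaw_acc (data : Option (List String)) (l : List Char) (r : List (Option String)) (idx : Int) :
    (l.foldl (altRawStep data) (r, idx)).1 = r ++ (l.foldl (altRawStep data) ([], idx)).1 := by
  induction l generalizing r idx with
  | nil => simp
  | cons c l ih =>
    simp only [List.foldl_cons, altRawStep]
    split_ifs <;> simp only [List.nil_append] <;>
      rw [ih, ih [_]] <;> simp

-- A's loop equals raw-build-then-fill, for any starting accumulator/prev/idx
theorem loop_eq_raw_fill (data : Option (List String)) (l : List Char) (out : List String)
    (prev : Option String) (idx : Int) :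
    (l.foldl (valueOnlyWaveStep data) (out, prev, idx)).1 =
      (((l.foldl (altRawStep data) ([], idx)).1).foldl altFillStep (out, prev)).1 := by
  induction l generalizing out prev idx with
  | nil => simp
  | cons c l ih =>
    simp only [List.foldl_cons, valueOnlyWaveStep, altRawStep]
    split_ifs <;> simp only [List.nil_append] <;>
      rw [ih, altRaw_acc data l [_], List.foldl_append] <;> simp [altFillStep]

-- ===== VERDICT (by name: the statement is the Claim_ definition above) =====
theorem value_only_wave_spec : Claim_equal_value_only_wave := by
  intro wave data _ _
  unfold Spec_value_only_wave value_only_wave value_only_wave_alt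
  exact loop_eq_raw_fill data wave.toList [] none 0
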